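-- pv_equiv track=rewrite | github.com/YuHyeonGeun-KOR/My-Algorithm-Journey | zerobase/ameba.py | solution
-- ===== SOURCE A (Python) =====
-- import heapq
--
-- def solution(delay, N):
--     answer = 1
--     queue = []
--     heapq.heappush(queue, [0 , 0,True])
--
--     while queue:
--         now = heapq.heappop(queue)
--         if now[0] == N :
--                 continue
--         if now[2]:
--             heapq.heappush(queue , [now[0] + 1, 0 ,True])
--             heapq.heappush(queue , [now[0] + 1, 0 ,False])
--             answer += 2
--         else:
--
--             if now[1] < delay:
--                 heapq.heappush(queue, [now[0]+1 , now[1] + 1 , False])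
--             elif now[1] == delay:
--                 heapq.heappush(queue , [now[0] + 1 , 0 , True])
--                 heapq.heappush(queue , [now[0] + 1 , 0 , False])
--                 answer +=2
--
--     return answer
-- ===== SOURCE B (Python) =====
-- def solution(delay, N):
--     # DP over aggregated counts per (delay-counter) state instead of simulating
--     # every amoeba on a heap.  The counter window is capped at the N-generation
--     # horizon: a counter slot beyond it can never reach `delay` within N steps.
--     answer = 1
--     mature = 1
--     d = min(delay, N)
--     imm = [0] * (d + 1) if delay >= 0 else []  # imm[c] = immature amoebas with counter c
--     for _ in range(N):
--         ready = mature + (imm[-1] if imm else 0)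
--         answer += 2 * ready
--         mature = ready
--         if imm:
--             imm = [ready] + imm[:-1]
--     return answer
-- ===== Notes on version B (the rewrite author's own statement) =====
-- stated objective: faster
-- what changed: Replaces the heap simulation of every individual amoeba (exponentially many nodes) with a dynamic program over aggregated counts per delay-counter state, advanced one generation per step.
-- outside the precondition, e.g. on solution(1, -1): A does not finish within the time limit, B returns 1
import Mathlib
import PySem

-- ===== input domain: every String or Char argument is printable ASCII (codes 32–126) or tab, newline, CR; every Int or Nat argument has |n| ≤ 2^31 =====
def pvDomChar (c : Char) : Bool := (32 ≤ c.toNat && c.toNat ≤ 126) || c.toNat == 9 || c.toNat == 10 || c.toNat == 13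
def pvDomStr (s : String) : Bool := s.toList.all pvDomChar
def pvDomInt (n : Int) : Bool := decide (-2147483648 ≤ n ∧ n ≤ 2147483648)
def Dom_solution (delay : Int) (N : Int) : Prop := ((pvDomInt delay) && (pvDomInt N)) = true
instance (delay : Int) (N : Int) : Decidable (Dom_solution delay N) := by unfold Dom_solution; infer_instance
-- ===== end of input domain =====

-- B replaces A's per-amoeba heap simulation (exponential in N) by a dynamic program
-- over aggregated counts per delay-counter state: O(N*delay) — objective: faster.

-- ===== PORT A =====
-- A's heap entries [gen, counter, mature]; Python list comparison is lexicographic,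
-- with False < True for the Bool component.
def nodeLt (x y : Int × Int × Bool) : Bool :=
  if x.1 < y.1 then true
  else if x.1 = y.1 then
    if x.2.1 < y.2.1 then true
    else if x.2.1 = y.2.1 then (!x.2.2 && y.2.2)
    else false
  else false

def minNode (a : Int × Int × Bool) (l : List (Int × Int × Bool)) : Int × Int × Bool :=
  l.foldl (fun m x => if nodeLt x m then x else m) a

-- heapq.heappop modelled as: remove a minimal element of the queue (which minimal
-- element is popped among ties cannot affect the answer: every pushed node is
-- eventually popped and processed exactly once, independently of the others).
def popA (q : List (Int × Int × Bool)) : Option ((Int × Int × Bool) × List (Int × Int × Bool)) :=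
  match q with
  | [] => none
  | x :: xs => some (minNode x xs, (x :: xs).erase (minNode x xs))

-- bound on the number of loop iterations: Σ 3^(N - gen) over the queue
def muA (N : Int) (q : List (Int × Int × Bool)) : Nat :=
  (q.map (fun x => 3 ^ (N - x.1).toNat)).sum

-- the while loop of A; the Nat fuel is only a totality guard — 'solution' passes
-- fuel exceeding muA, which (proved below) bounds the number of iterations
def loopA (delay : Int) (N : Int) : Nat → List (Int × Int × Bool) → Int → Int
  | 0, _, answer => answer
  | fuel + 1, q, answer =>
    match popA q with
    | none => answer
    | some (now, rest) =>
      if now.1 = N then loopA delay N fuel rest answer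
      else if now.2.2 then
        loopA delay N fuel ((now.1 + 1, 0, true) :: (now.1 + 1, 0, false) :: rest) (answer + 2)
      else if now.2.1 < delay then
        loopA delay N fuel ((now.1 + 1, now.2.1 + 1, false) :: rest) answer
      else if now.2.1 = delay then
        loopA delay N fuel ((now.1 + 1, 0, true) :: (now.1 + 1, 0, false) :: rest) (answer + 2)
      else
        loopA delay N fuel rest answer

def solution (delay : Int) (N : Int) : Int :=
  loopA delay N (muA N [(0, 0, true)] + 1) [(0, 0, true)] 1

-- ===== PORT B =====
-- one generation step of the DP: state (answer, mature, imm)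
def stepB (st : Int × Int × List Int) : Int × Int × List Int :=
  match st with
  | (answer, mature, imm) =>
    -- ready = mature + (imm[-1] if imm else 0)
    let ready := mature + (match imm.getLast? with | some x => x | none => 0)
    (answer + 2 * ready, ready,
      if imm.isEmpty then imm else ready :: imm.dropLast)  -- imm = [ready] + imm[:-1]

def solution_alt (delay : Int) (N : Int) : Int :=
  -- initial state: answer = 1, mature = 1, d = min(delay, N),
  -- imm = [0] * (d + 1) if delay >= 0 else []
  ((PySem.List.pyRange 0 N 1).foldl (fun st _ => stepB st)
    (1, 1, if 0 ≤ delay then List.replicate (min delay N + 1).toNat 0 else [])).1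

-- ===== PRECONDITION & SPEC =====
-- A's while loop never terminates for N < 0 (generations only grow and never hit N),
-- so Pre_ admits exactly the inputs on which A returns.
def Pre_solution (delay : Int) (N : Int) : Prop := 0 ≤ N
instance (delay : Int) (N : Int) : Decidable (Pre_solution delay N) := by
  unfold Pre_solution; infer_instance

def pvWitness_solution : Int × Int := (2, 3)

def Spec_solution (delay : Int) (N : Int) (out : Int) : Prop := out = solution_alt delay N
instance (delay : Int) (N : Int) (out : Int) : Decidable (Spec_solution delay N out) := by
  unfold Spec_solution; infer_instance

-- ===== CLAIM (what is proved, stated in full; the proofs are below) =====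
def Claim_equal_solution : Prop := ∀ (delay : Int) (N : Int), Dom_solution delay N → Pre_solution delay N → Spec_solution delay N (solution delay N)

-- ===== LEMMAS AND PROOFS =====

-- value function: total contribution to 'answer' of the subtree of one node with
-- n generations left, delay-counter c, maturity b
def v (delay : Int) : Nat → Int → Bool → Int
  | 0, _, _ => 0
  | n + 1, c, b =>
    if b then 2 + v delay n 0 true + v delay n 0 false
    else if c < delay then v delay n (c + 1) false
    else if c = delay then 2 + v delay n 0 true + v delay n 0 false
    else 0

def vNode (delay : Int) (N : Int) (x : Int × Int × Bool) : Int :=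
  v delay (N - x.1).toNat x.2.1 x.2.2

def WS (delay : Int) (N : Int) (q : List (Int × Int × Bool)) : Int :=
  (q.map (vNode delay N)).sum

theorem minNode_mem (a : Int × Int × Bool) (l : List (Int × Int × Bool)) :
    minNode a l ∈ a :: l := by
  unfold minNode
  induction l generalizing a with
  | nil => simp
  | cons y ys ih =>
    simp only [List.foldl_cons]
    have h := List.mem_cons.mp (ih (if nodeLt y a then y else a))
    rcases h with h1 | h1
    · rcases Bool.eq_false_or_eq_true (nodeLt y a) with hc | hc <;>
        simp [hc] at h1 ⊢ <;> simp [h1]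
    · simp [h1]

theorem popA_perm {q : List (Int × Int × Bool)} {now : Int × Int × Bool}
    {rest : List (Int × Int × Bool)} (hp : popA q = some (now, rest)) :
    q.Perm (now :: rest) := by
  unfold popA at hp
  cases q with
  | nil => simp at hp
  | cons x xs =>
    simp only [Option.some.injEq, Prod.mk.injEq] at hp
    obtain ⟨h1, h2⟩ := hp
    subst h1; subst h2
    exact List.perm_cons_erase (minNode_mem x xs)

theorem muA_pop (N : Int) {q : List (Int × Int × Bool)} {now : Int × Int × Bool}
    {rest : List (Int × Int × Bool)} (hp : popA q = some (now, rest)) :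
    muA N q = 3 ^ (N - now.1).toNat + muA N rest := by
  unfold muA
  rw [((popA_perm hp).map (fun x => 3 ^ (N - x.1).toNat)).sum_eq]
  simp

theorem pow3_lt (k : Nat) (hk : 1 ≤ k) : 3 ^ (k - 1) + 3 ^ (k - 1) < 3 ^ k := by
  obtain ⟨j, rfl⟩ : ∃ j, k = j + 1 := ⟨k - 1, by omega⟩
  have h1 : 1 ≤ 3 ^ j := Nat.one_le_pow _ _ (by norm_num)
  have h2 : 3 ^ (j + 1) = 3 ^ j * 3 := pow_succ 3 j
  simp only [Nat.add_sub_cancel]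
  omega

theorem pow3_pos (k : Nat) : 1 ≤ 3 ^ k := Nat.one_le_pow _ _ (by norm_num)

theorem WS_pop (delay N : Int) {q : List (Int × Int × Bool)} {now : Int × Int × Bool}
    {rest : List (Int × Int × Bool)} (hp : popA q = some (now, rest)) :
    WS delay N q = vNode delay N now + WS delay N rest := by
  unfold WS
  rw [((popA_perm hp).map (vNode delay N)).sum_eq]
  simp

theorem popA_none {q : List (Int × Int × Bool)} (h : popA q = none) : q = [] := by
  cases q with
  | nil => rfl
  | cons x xs => simp [popA] at h

theorem loopA_eq (delay N : Int) (fuel : Nat) :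
    ∀ (q : List (Int × Int × Bool)) (answer : Int),
    (∀ x ∈ q, x.1 ≤ N) → muA N q < fuel →
    loopA delay N fuel q answer = answer + WS delay N q := by
  induction fuel with
  | zero => intro q answer _ hfuel; omega
  | succ fuel ih =>
    intro q answer hbound hfuel
    cases hp : popA q with
    | none =>
      rw [popA_none hp]
      simp [loopA, popA, WS]
    | some pr =>
      obtain ⟨now, rest⟩ := pr
      have hperm := popA_perm hp
      have hmemq : now ∈ q := hperm.mem_iff.mpr (List.mem_cons_self)
      have hnowN : now.1 ≤ N := hbound now hmemq
      have hrb : ∀ x ∈ rest, x.1 ≤ N := fun x hx =>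
        hbound x (hperm.mem_iff.mpr (List.mem_cons_of_mem _ hx))
      have hmu := muA_pop N hp
      have hpop := WS_pop delay N hp
      have hpos := pow3_pos (N - now.1).toNat
      simp only [loopA, hp]
      by_cases hN : now.1 = N
      · rw [if_pos hN, ih rest answer hrb (by omega)]
        have h0 : vNode delay N now = 0 := by
          simp [vNode, show (N - now.1).toNat = 0 by omega, v]
        omega
      · rw [if_neg hN]
        have hlt : now.1 < N := by omega
        have hk : (N - now.1).toNat = (N - (now.1 + 1)).toNat + 1 := by omega
        have h3 := pow3_lt (N - now.1).toNat (by omega)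
        have hkk : (N - (now.1 + 1)).toNat = (N - now.1).toNat - 1 := by omega
        by_cases hb : now.2.2 = true
        · rw [if_pos hb]
          have hnow : vNode delay N now =
              2 + vNode delay N (now.1 + 1, 0, true) + vNode delay N (now.1 + 1, 0, false) := by
            simp [vNode, hk, hb, v]
          have hws : WS delay N ((now.1 + 1, 0, true) :: (now.1 + 1, 0, false) :: rest) =
              vNode delay N (now.1 + 1, 0, true) + vNode delay N (now.1 + 1, 0, false) +
                WS delay N rest := by
            simp [WS]; ring
          rw [ih _ (answer + 2)
            (by intro x hx
                simp only [List.mem_cons] at hx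
                rcases hx with rfl | rfl | hx
                · simp; omega
                · simp; omega
                · exact hrb x hx)
            (by simp only [muA, List.map_cons, List.sum_cons]
                simp only [muA] at hmu hfuel
                rw [hkk]
                omega),
            hws]
          omega
        · rw [if_neg hb]
          have hb' : now.2.2 = false := by simpa using hb
          by_cases hc : now.2.1 < delay
          · rw [if_pos hc]
            have hnow : vNode delay N now = vNode delay N (now.1 + 1, now.2.1 + 1, false) := by
              simp [vNode, hk, hb', v, hc]
            have hws : WS delay N ((now.1 + 1, now.2.1 + 1, false) :: rest) =
                vNode delay N (now.1 + 1, now.2.1 + 1, false) + WS delay N rest := by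
              simp [WS]
            rw [ih _ answer
              (by intro x hx
                  simp only [List.mem_cons] at hx
                  rcases hx with rfl | hx
                  · simp; omega
                  · exact hrb x hx)
              (by simp only [muA, List.map_cons, List.sum_cons]
                  simp only [muA] at hmu hfuel
                  rw [hkk]
                  omega),
              hws]
            omega
          · rw [if_neg hc]
            by_cases he : now.2.1 = delay
            · rw [if_pos he]
              have hnow : vNode delay N now =
                  2 + vNode delay N (now.1 + 1, 0, true) + vNode delay N (now.1 + 1, 0, false) := by
                simp [vNode, hk, hb', v, he]
              have hws : WS delay N ((now.1 + 1, 0, true) :: (now.1 + 1, 0, false) :: rest) =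
                  vNode delay N (now.1 + 1, 0, true) + vNode delay N (now.1 + 1, 0, false) +
                    WS delay N rest := by
                simp [WS]; ring
              rw [ih _ (answer + 2)
                (by intro x hx
                    simp only [List.mem_cons] at hx
                    rcases hx with rfl | rfl | hx
                    · simp; omega
                    · simp; omega
                    · exact hrb x hx)
                (by simp only [muA, List.map_cons, List.sum_cons]
                    simp only [muA] at hmu hfuel
                    rw [hkk]
                    omega),
                hws]
              omega
            · rw [if_neg he]
              have hnow : vNode delay N now = 0 := by
                simp [vNode, hk, hb', v, hc, he]
              rw [ih rest answer hrb (by omega)]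
              omega

theorem solution_eq (delay N : Int) (hN : 0 ≤ N) :
    solution delay N = 1 + v delay N.toNat 0 true := by
  unfold solution
  rw [loopA_eq delay N _ [(0, 0, true)] 1
    (by intro x hx; simp at hx; subst hx; simpa using hN)
    (Nat.lt_succ_self _)]
  simp [WS, vNode]

-- B-side
def iterB : Nat → (Int × Int × List Int) → (Int × Int × List Int)
  | 0, s => s
  | n + 1, s => iterB n (stepB s)

def gsum (delay : Int) (n : Nat) (c : Int) : List Int → Int
  | [] => 0
  | x :: xs => x * v delay n c false + gsum delay n (c + 1) xs

theorem foldl_stepB (l : List Int) (s : Int × Int × List Int) :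
    l.foldl (fun st _ => stepB st) s = iterB l.length s := by
  induction l generalizing s with
  | nil => rfl
  | cons x xs ih => simpa [iterB] using ih (stepB s)

theorem gsum_zero (delay : Int) (c : Int) (xs : List Int) : gsum delay 0 c xs = 0 := by
  induction xs generalizing c with
  | nil => rfl
  | cons y ys ih => simp [gsum, v, ih]

theorem vF_neg (delay : Int) (hd : delay < 0) (n : Nat) : v delay n 0 false = 0 := by
  cases n with
  | zero => rfl
  | succ m => simp [v, show ¬(0 : Int) < delay by omega, show ¬(0 : Int) = delay by omega]

theorem gsum_shift (delay : Int) (n : Nat) (xs : List Int) :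
    ∀ c : Int, xs ≠ [] → c + (xs.length : Int) = delay + 1 →
    gsum delay (n + 1) c xs =
      gsum delay n (c + 1) xs.dropLast +
        (xs.getLast?).getD 0 * (2 + v delay n 0 true + v delay n 0 false) := by
  induction xs with
  | nil => intro c hne _; exact absurd rfl hne
  | cons x xs ih =>
    intro c hne hlen
    cases xs with
    | nil =>
      have hc : c = delay := by simp at hlen; omega
      subst hc
      simp [gsum, v]
    | cons y ys =>
      simp only [List.length_cons] at hlen
      push_cast at hlen
      have hlt : c < delay := by omega
      have ih2 := ih (c + 1) (by simp) (by simp; omega)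
      have hv : v delay (n + 1) c false = v delay n (c + 1) false := by
        simp [v, hlt]
      have hL : gsum delay (n + 1) c (x :: y :: ys) =
          x * v delay (n + 1) c false + gsum delay (n + 1) (c + 1) (y :: ys) := rfl
      have hR : gsum delay n (c + 1) (x :: (y :: ys).dropLast) =
          x * v delay n (c + 1) false + gsum delay n (c + 1 + 1) (y :: ys).dropLast := rfl
      rw [List.dropLast_cons₂, List.getLast?_cons_cons, hL, hR, ih2, hv]
      ring

theorem gsum_replicate (delay : Int) (n : Nat) (k : Nat) :
    ∀ c : Int, gsum delay n c (List.replicate k 0) = 0 := by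
  induction k with
  | zero => intro c; rfl
  | succ m ih => intro c; simp [List.replicate_succ, gsum, ih]

theorem iterB_fst (delay : Int) (n : Nat) :
    ∀ (a m : Int) (imm : List Int),
    (if 0 ≤ delay then imm.length = (delay + 1).toNat else imm = []) →
    (iterB n (a, m, imm)).1 = a + m * v delay n 0 true + gsum delay n 0 imm := by
  induction n with
  | zero => intro a m imm _; simp [iterB, v, gsum_zero]
  | succ n ih =>
    intro a m imm himm
    have hvT : v delay (n + 1) 0 true = 2 + v delay n 0 true + v delay n 0 false := by
      simp [v]
    by_cases hd : 0 ≤ delay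
    · rw [if_pos hd] at himm
      have hne : imm ≠ [] := by
        intro h; subst h; simp at himm; omega
      obtain ⟨l, hl⟩ : ∃ l, imm.getLast? = some l := by
        cases h : imm.getLast? with
        | none => exact absurd (List.getLast?_eq_none_iff.mp h) hne
        | some l => exact ⟨l, rfl⟩
      have hemp : imm.isEmpty = false := by
        cases imm with
        | nil => exact absurd rfl hne
        | cons z zs => rfl
      have hst : stepB (a, m, imm) = (a + 2 * (m + l), m + l, (m + l) :: imm.dropLast) := by
        simp [stepB, hl, hemp]
      have hpos : 1 ≤ imm.length := List.length_pos_iff.mpr hne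
      have hlen2 : ((m + l) :: imm.dropLast).length = (delay + 1).toNat := by
        simp [List.length_dropLast]; omega
      have hrec : iterB (n + 1) (a, m, imm) = iterB n (stepB (a, m, imm)) := rfl
      rw [hrec, hst, ih (a + 2 * (m + l)) (m + l) _ (by rw [if_pos hd]; exact hlen2)]
      have hshift := gsum_shift delay n imm 0 hne (by omega)
      rw [hl] at hshift
      simp only [Option.getD_some] at hshift
      have hg : gsum delay n 0 ((m + l) :: imm.dropLast) =
          (m + l) * v delay n 0 false + gsum delay n (0 + 1) imm.dropLast := by
        simp [gsum]
      rw [hg, hvT, hshift]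
      ring
    · rw [if_neg hd] at himm
      subst himm
      have hst : stepB (a, m, ([] : List Int)) = (a + 2 * m, m, []) := by simp [stepB]
      have hrec : iterB (n + 1) (a, m, ([] : List Int)) = iterB n (stepB (a, m, [])) := rfl
      rw [hrec, hst, ih (a + 2 * m) m [] (by rw [if_neg hd])]
      have hvF : v delay n 0 false = 0 := vF_neg delay (by omega) n
      simp [gsum, hvT, hvF]
      ring

theorem v_ext (d1 d2 : Int) : ∀ (n : Nat) (c : Int) (b : Bool),
    0 ≤ c → c + n ≤ d1 → c + n ≤ d2 → v d1 n c b = v d2 n c b := by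
  intro n
  induction n with
  | zero => intro c b _ _ _; rfl
  | succ n ih =>
    intro c b hc h1 h2
    have hc1 : c < d1 := by omega
    have hc2 : c < d2 := by omega
    cases b with
    | true =>
      have e1 : v d1 (n + 1) c true = 2 + v d1 n 0 true + v d1 n 0 false := by simp [v]
      have e2 : v d2 (n + 1) c true = 2 + v d2 n 0 true + v d2 n 0 false := by simp [v]
      rw [e1, e2, ih 0 true (by omega) (by omega) (by omega),
        ih 0 false (by omega) (by omega) (by omega)]
    | false =>
      have e1 : v d1 (n + 1) c false = v d1 n (c + 1) false := by simp [v, hc1]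
      have e2 : v d2 (n + 1) c false = v d2 n (c + 1) false := by simp [v, hc2]
      rw [e1, e2, ih (c + 1) false (by omega) (by omega) (by omega)]

theorem alt_eq (delay N : Int) (hN : 0 ≤ N) :
    solution_alt delay N = 1 + v delay N.toNat 0 true := by
  unfold solution_alt
  rw [foldl_stepB, PySem.List.length_pyRange_one]
  have hlen : (N - 0).toNat = N.toNat := by omega
  rw [hlen]
  by_cases hd : 0 ≤ delay
  · have hdm : 0 ≤ min delay N := le_min hd hN
    simp only [if_pos hd]
    rw [iterB_fst (min delay N) N.toNat 1 1 (List.replicate (min delay N + 1).toNat 0)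
      (by rw [if_pos hdm]; simp)]
    rw [gsum_replicate]
    have hv : v (min delay N) N.toNat 0 true = v delay N.toNat 0 true := by
      rcases lt_or_ge delay N with h | h
      · rw [min_eq_left (by omega)]
      · exact v_ext (min delay N) delay N.toNat 0 true (le_refl 0) (by omega) (by omega)
    rw [hv]
    ring
  · simp only [if_neg hd]
    rw [iterB_fst delay N.toNat 1 1 [] (by rw [if_neg hd])]
    simp [gsum]

-- ===== VERDICT (by name: the statement is the Claim_ definition above) =====
theorem solution_spec : Claim_equal_solution := by
  intro delay N _ hN
  unfold Spec_solution
  rw [solution_eq delay N hN, alt_eq delay N hN]
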